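-- pv_equiv track=rewrite | github.com/ukeate/agent | apps/api/src/ai/langgraph/versioning.py | get_minimum_version
-- ===== SOURCE A (Python) =====
-- from typing import Dict, Any, Tuple, Callable, Optional, List
--
-- def get_minimum_version(features: List[str]) -> str:
--     """获取支持所有指定功能的最低版本"""
--     version_features = {
--         "1.0": ["basic_context"],
--         "1.1": ["basic_context", "user_preferences", "session_context", "performance_tags"],
--         "1.2": [
--             "basic_context", "user_preferences", "session_context",
--             "workflow_metadata", "performance_tags", "generic_support"
--         ]
--     }
--
--     for version in ["1.0", "1.1", "1.2"]:
--         if all(feature in version_features[version] for feature in features):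
--             return version
--
--     # 如果没有版本支持所有功能，返回最新版本
--     return "1.2"
-- ===== SOURCE B (Python) =====
-- FEATURE_INTRO = {
--     "basic_context": "1.0",
--     "user_preferences": "1.1",
--     "session_context": "1.1",
--     "performance_tags": "1.1",
--     "workflow_metadata": "1.2",
--     "generic_support": "1.2",
-- }
--
-- def get_minimum_version(features):
--     """获取支持所有指定功能的最低版本: running max of each feature's introduction version."""
--     result = "1.0"
--     for f in features:
--         v = FEATURE_INTRO.get(f, "1.2")
--         if v > result:
--             result = v
--     return result
-- ===== Notes on version B (the rewrite author's own statement) =====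
-- stated objective: alternative
-- what changed: Replaced the all()-containment scan over the ordered version list by a single pass over the requested features taking the running lexicographic maximum of each feature's introduction version from a feature->version table (unknown features default to '1.2').
import Mathlib
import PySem

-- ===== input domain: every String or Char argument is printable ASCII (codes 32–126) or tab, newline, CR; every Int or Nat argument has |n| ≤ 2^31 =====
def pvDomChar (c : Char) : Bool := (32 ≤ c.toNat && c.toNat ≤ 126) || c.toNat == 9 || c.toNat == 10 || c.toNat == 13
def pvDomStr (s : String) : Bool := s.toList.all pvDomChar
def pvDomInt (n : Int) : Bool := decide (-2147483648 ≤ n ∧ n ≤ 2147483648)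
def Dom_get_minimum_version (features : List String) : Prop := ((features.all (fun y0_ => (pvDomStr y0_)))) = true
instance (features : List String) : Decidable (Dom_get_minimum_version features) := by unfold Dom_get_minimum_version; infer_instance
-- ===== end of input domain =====

-- B replaces A's per-version all()-containment loop by one pass over the features
-- keeping the running lexicographic maximum of each feature's introduction version (objective: alternative).

-- ===== PORT A =====
def pvVersionFeatures : PySem.Dict String (List String) :=
  PySem.Dict.ofList
    [("1.0", ["basic_context"]),
     ("1.1", ["basic_context", "user_preferences", "session_context", "performance_tags"]),
     ("1.2", ["basic_context", "user_preferences", "session_context",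
              "workflow_metadata", "performance_tags", "generic_support"])]

-- the 'for version in [...]' loop: return the first version whose feature list contains all requested features
def pvLoopA (features : List String) : List String → String
  | [] => "1.2"
  | v :: rest =>
      if features.all (fun feature => (PySem.Dict.getD pvVersionFeatures v []).contains feature) then v
      else pvLoopA features rest

def get_minimum_version (features : List String) : String :=
  pvLoopA features ["1.0", "1.1", "1.2"]

-- ===== PORT B =====
def pvFeatureIntro : PySem.Dict String String :=
  PySem.Dict.ofList
    [("basic_context", "1.0"),
     ("user_preferences", "1.1"),
     ("session_context", "1.1"),
     ("performance_tags", "1.1"),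
     ("workflow_metadata", "1.2"),
     ("generic_support", "1.2")]

-- 'v > result' on Python str is code-point lexicographic: exact as '<' on .toList (PYSEM.md str COMPARISON)
def get_minimum_version_alt (features : List String) : String :=
  features.foldl
    (fun result f =>
      let v := PySem.Dict.getD pvFeatureIntro f "1.2"
      if result.toList < v.toList then v else result)
    "1.0"

-- ===== PRECONDITION & SPEC =====
def Spec_get_minimum_version (features : List String) (out : String) : Prop := out = get_minimum_version_alt features
instance (features : List String) (out : String) : Decidable (Spec_get_minimum_version features out) := by unfold Spec_get_minimum_version; infer_instance

-- ===== CLAIM (what is proved, stated in full; the proofs are below) =====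
def Claim_equal_get_minimum_version : Prop := ∀ (features : List String), Dom_get_minimum_version features → Spec_get_minimum_version features (get_minimum_version features)

-- ===== LEMMAS AND PROOFS =====

-- level of a feature: the index of the earliest version supporting it (3 = no version supports it)
def pvLvl (f : String) : Nat :=
  if f = "basic_context" then 0
  else if f = "user_preferences" ∨ f = "session_context" ∨ f = "performance_tags" then 1
  else if f = "workflow_metadata" ∨ f = "generic_support" then 2
  else 3

-- version string of a level (levels 2 and 3 both map to "1.2")
def pvF : Nat → String
  | 0 => "1.0"
  | 1 => "1.1"
  | _ => "1.2"

-- running maximum of the levels of the features, seeded with m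
def pvM (features : List String) (m : Nat) : Nat :=
  features.foldl (fun m f => max m (pvLvl f)) m

lemma mem10 (f : String) :
    (PySem.Dict.getD pvVersionFeatures "1.0" []).contains f = decide (pvLvl f ≤ 0) := by
  have hd : PySem.Dict.getD pvVersionFeatures "1.0" [] = ["basic_context"] := by decide
  rw [hd]; unfold pvLvl; split_ifs <;> simp_all
lemma mem11 (f : String) :
    (PySem.Dict.getD pvVersionFeatures "1.1" []).contains f = decide (pvLvl f ≤ 1) := by
  have hd : PySem.Dict.getD pvVersionFeatures "1.1" [] =
      ["basic_context", "user_preferences", "session_context", "performance_tags"] := by decide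
  rw [hd]; unfold pvLvl; split_ifs <;> simp_all
lemma mem12 (f : String) :
    (PySem.Dict.getD pvVersionFeatures "1.2" []).contains f = decide (pvLvl f ≤ 2) := by
  have hd : PySem.Dict.getD pvVersionFeatures "1.2" [] =
      ["basic_context", "user_preferences", "session_context",
       "workflow_metadata", "performance_tags", "generic_support"] := by decide
  rw [hd]; unfold pvLvl
  split_ifs <;> simp_all
  tauto

lemma introB (f : String) : PySem.Dict.getD pvFeatureIntro f "1.2" = pvF (pvLvl f) := by
  unfold pvLvl
  split_ifs with h1 h2 h3
  · subst h1; decide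
  · rcases h2 with h | h | h <;> subst h <;> decide
  · rcases h3 with h | h <;> subst h <;> decide
  · push Not at h2 h3
    have hd : pvFeatureIntro = PySem.Dict.mk
      [("basic_context", "1.0"), ("user_preferences", "1.1"), ("session_context", "1.1"),
       ("performance_tags", "1.1"), ("workflow_metadata", "1.2"), ("generic_support", "1.2")] := by decide
    rw [hd]
    simp only [PySem.Dict.getD, PySem.Dict.get?_mk_cons, beq_iff_eq]
    rw [if_neg (Ne.symm h1), if_neg (Ne.symm h2.1), if_neg (Ne.symm h2.2.1),
        if_neg (Ne.symm h2.2.2), if_neg (Ne.symm h3.1), if_neg (Ne.symm h3.2)]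
    rfl

lemma maxstr (m l : Nat) :
    (if (pvF m).toList < (pvF l).toList then pvF l else pvF m) = pvF (max m l) := by
  match m, l with
  | 0, 0 => decide
  | 0, 1 => decide
  | 0, l+2 => simp only [pvF, Nat.max_eq_right (by omega : 0 ≤ l + 2)]; decide
  | 1, 0 => decide
  | 1, 1 => decide
  | 1, l+2 => simp only [pvF, Nat.max_eq_right (by omega : 1 ≤ l + 2)]; decide
  | m+2, 0 => simp only [pvF, Nat.max_eq_left (by omega : 0 ≤ m + 2)]; decide
  | m+2, 1 => simp only [pvF, Nat.max_eq_left (by omega : 1 ≤ m + 2)]; decide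
  | m+2, l+2 =>
      have : max (m+2) (l+2) = (max m l) + 2 := by omega
      simp only [pvF, this]
      decide

lemma M_le (features : List String) (m k : Nat) :
    pvM features m ≤ k ↔ m ≤ k ∧ ∀ f ∈ features, pvLvl f ≤ k := by
  induction features generalizing m with
  | nil => simp [pvM]
  | cons f fs ih =>
      simp only [pvM, List.foldl_cons] at *
      rw [ih]
      simp
      tauto

lemma all_iff (features : List String) (k : Nat) :
    (features.all (fun f => decide (pvLvl f ≤ k)) = true) ↔ pvM features 0 ≤ k := by
  rw [M_le]
  simp

lemma A_eq (features : List String) : get_minimum_version features = pvF (pvM features 0) := by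
  simp only [get_minimum_version, pvLoopA]
  simp only [mem10, mem11, mem12]
  rcases h : pvM features 0 with _ | _ | n
  · rw [if_pos (by rw [all_iff, h])]; rfl
  · rw [if_neg (by rw [all_iff, h]; omega), if_pos (by rw [all_iff, h])]; rfl
  · rw [if_neg (by rw [all_iff, h]; omega), if_neg (by rw [all_iff, h]; omega)]
    split <;> rfl

lemma B_fold (features : List String) (m : Nat) :
    features.foldl
      (fun result f =>
        let v := PySem.Dict.getD pvFeatureIntro f "1.2"
        if result.toList < v.toList then v else result)
      (pvF m) = pvF (pvM features m) := by
  induction features generalizing m with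
  | nil => simp [pvM]
  | cons f fs ih =>
      simp only [List.foldl_cons, introB, maxstr, pvM] at *
      exact ih (max m (pvLvl f))

lemma B_eq (features : List String) : get_minimum_version_alt features = pvF (pvM features 0) := by
  have := B_fold features 0
  unfold get_minimum_version_alt
  simpa [pvF] using this

-- ===== VERDICT (by name: the statement is the Claim_ definition above) =====
theorem get_minimum_version_spec : Claim_equal_get_minimum_version := by
  intro features _
  unfold Spec_get_minimum_version
  rw [A_eq, B_eq]
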